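-- pv_equiv track=rewrite | github.com/foxyr20/wiki | scripts/normalize_wiki.py | rebuild_meta
-- ===== SOURCE A (Python) =====
-- from typing import List, Tuple
--
-- META_ORDER = [
--     "Title",
--     "Author",
--     "Date",
--     "Background",
--     "ButtonImage",
--     "ButtonDesc",
-- ]
--
-- def normalize_keys_capitalization(key: str) -> str:
--     lower = key.lower()
--     for wanted in META_ORDER:
--         if wanted.lower() == lower:
--             return wanted
--
--     return key[:1].upper() + key[1:]
--
-- def rebuild_meta(items: List[Tuple[str, str]]) -> str:
--     last_map: dict[str, Tuple[str, str]] = {}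
--     for k, v in items:
--         last_map[k.lower()] = (k, v)
--
--     out: List[Tuple[str, str]] = []
--     for wanted in META_ORDER:
--         pair = last_map.pop(wanted.lower(), None)
--         if pair:
--             out.append((wanted, pair[1]))
--
--     for _, (k, v) in sorted(last_map.items(), key=lambda kv: kv[0]):
--         out.append((normalize_keys_capitalization(k), v))
--
--     if not out:
--         return ""
--
--     return "\n".join(f"{k}: {v}".rstrip() for k, v in out) + "\n\n"
-- ===== SOURCE B (Python) =====
-- from typing import List, Tuple
--
-- META_ORDER = [
--     "Title",
--     "Author",
--     "Date",
--     "Background",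
--     "ButtonImage",
--     "ButtonDesc",
-- ]
--
-- def normalize_keys_capitalization(key: str) -> str:
--     lower = key.lower()
--     for wanted in META_ORDER:
--         if wanted.lower() == lower:
--             return wanted
--
--     return key[:1].upper() + key[1:]
--
-- def rebuild_meta(items: List[Tuple[str, str]]) -> str:
--     last = {k.lower(): (k, v) for k, v in items}
--     index = {w.lower(): (i, w) for i, w in enumerate(META_ORDER)}
--
--     slots: List = [None] * len(META_ORDER)
--     others: List[Tuple[str, str]] = []
--     for lk, (k, v) in last.items():
--         hit = index.get(lk)
--         if hit is None:
--             others.append((k, v))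
--         else:
--             slots[hit[0]] = (hit[1], v)
--
--     out = [p for p in slots if p is not None]
--     out += [(normalize_keys_capitalization(k), v)
--             for k, v in sorted(others, key=lambda kv: kv[0].lower())]
--
--     if not out:
--         return ""
--
--     return "\n".join(f"{k}: {v}".rstrip() for k, v in out) + "\n\n"
-- ===== Notes on version B (the rewrite author's own statement) =====
-- stated objective: alternative
-- what changed: A iterates META_ORDER over the dedup dict, popping each wanted key and then sorting what is left; B makes one pass over the dedup dict, bucketing known keys into a fixed slot table via a precomputed lowercase->index map and collecting unknown keys for a single sort.
import Mathlib
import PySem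

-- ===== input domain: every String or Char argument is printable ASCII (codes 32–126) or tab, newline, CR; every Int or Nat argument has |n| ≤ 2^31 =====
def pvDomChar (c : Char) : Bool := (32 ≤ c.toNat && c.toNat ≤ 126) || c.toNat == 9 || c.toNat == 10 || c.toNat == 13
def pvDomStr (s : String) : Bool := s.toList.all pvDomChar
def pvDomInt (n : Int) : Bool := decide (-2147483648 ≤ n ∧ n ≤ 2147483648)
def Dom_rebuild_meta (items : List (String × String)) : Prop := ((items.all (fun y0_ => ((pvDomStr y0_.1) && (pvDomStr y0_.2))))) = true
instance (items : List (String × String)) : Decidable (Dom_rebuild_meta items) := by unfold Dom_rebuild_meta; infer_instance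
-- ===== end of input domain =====

-- B replaces A's pop-META_ORDER-then-sort-the-rest phases by one bucketing pass over the
-- dedup dict (fixed slot table via a lowercase->index map) plus a single sort of the unknown keys.

-- ===== PORT A =====
def metaOrder : List String :=
  ["Title", "Author", "Date", "Background", "ButtonImage", "ButtonDesc"]

-- normalize_keys_capitalization: first META_ORDER entry with equal lowercase, else capitalize
def normCap (key : String) : String :=
  let lower := PySem.Str.lower key
  match metaOrder.find? (fun wanted => PySem.Str.lower wanted == lower) with
  | some wanted => wanted
  | none => PySem.Str.upper (PySem.Str.slice key none (some 1)) ++ PySem.Str.slice key (some 1) none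

-- the last-wins dedup dict 'last_map' (both Pythons build it by the same dict fill)
def lastMapOf (items : List (String × String)) : PySem.Dict String (String × String) :=
  items.foldl (fun d kv => d.insert (PySem.Str.lower kv.1) (kv.1, kv.2)) PySem.Dict.empty

-- the shared final formatting ('if not out: return ""' / join / rstrip / trailing blank line)
def renderMeta (out : List (String × String)) : String :=
  if out.isEmpty then ""
  else PySem.Str.join "\n" (out.map (fun kv => PySem.Str.rstrip (kv.1 ++ ": " ++ kv.2))) ++ "\n\n"

-- A's first loop body: pair = last_map.pop(wanted.lower(), None); if pair: out.append(...)
def popStep (st : PySem.Dict String (String × String) × List (String × String)) (wanted : String) :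
    PySem.Dict String (String × String) × List (String × String) :=
  match st.1.pop? (PySem.Str.lower wanted) with
  | some pd => (pd.2, st.2 ++ [(wanted, pd.1.2)])
  | none => (st.1, st.2)

def rebuild_meta (items : List (String × String)) : String :=
  let lastMap := lastMapOf items
  let st := metaOrder.foldl popStep (lastMap, [])
  let out := st.2 ++
    (PySem.List.sorted st.1.items (fun kv => kv.1)).map (fun kv => (normCap kv.2.1, kv.2.2))
  renderMeta out

-- ===== PORT B =====
-- index = {w.lower(): (i, w) for i, w in enumerate(META_ORDER)}
def metaIndex : PySem.Dict String (Int × String) :=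
  (PySem.List.enumerate metaOrder).foldl
    (fun d iw => d.insert (PySem.Str.lower iw.2) (iw.1, iw.2)) PySem.Dict.empty

-- B's loop body: hit = index.get(lk); unknown keys collect, known keys fill their slot
def bucketStep (st : List (Option (String × String)) × List (String × String))
    (kv : String × (String × String)) :
    List (Option (String × String)) × List (String × String) :=
  match metaIndex.get? kv.1 with
  | none => (st.1, st.2 ++ [(kv.2.1, kv.2.2)])
  | some hit => (st.1.set hit.1.toNat (some (hit.2, kv.2.2)), st.2)

def rebuild_meta_alt (items : List (String × String)) : String :=
  let last := lastMapOf items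
  let st := last.items.foldl bucketStep (List.replicate metaOrder.length none, [])
  let out := st.1.filterMap id ++
    (PySem.List.sorted st.2 (fun kv => PySem.Str.lower kv.1)).map (fun kv => (normCap kv.1, kv.2))
  renderMeta out

-- ===== PRECONDITION & SPEC =====
def Spec_rebuild_meta (items : List (String × String)) (out : String) : Prop := out = rebuild_meta_alt items
instance (items : List (String × String)) (out : String) : Decidable (Spec_rebuild_meta items out) := by unfold Spec_rebuild_meta; infer_instance

-- ===== CLAIM (what is proved, stated in full; the proofs are below) =====
def Claim_equal_rebuild_meta : Prop := ∀ (items : List (String × String)), Dom_rebuild_meta items → Spec_rebuild_meta items (rebuild_meta items)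

-- ===== LEMMAS AND PROOFS =====

-- proof-only abbreviation: the lowercased META_ORDER keys
def lows : List String :=
  ["title", "author", "date", "background", "buttonimage", "buttondesc"]

lemma metaIndex_eq : metaIndex = PySem.Dict.mk
    [("title", (0, "Title")), ("author", (1, "Author")), ("date", (2, "Date")),
     ("background", (3, "Background")), ("buttonimage", (4, "ButtonImage")),
     ("buttondesc", (5, "ButtonDesc"))] := by decide

lemma lows_eq : metaOrder.map PySem.Str.lower = lows := by decide

-- dict.erase at one key does not change lookups at another
lemma get?_erase_of_ne (d : PySem.Dict String (String × String)) (k k' : String) (h : k ≠ k') :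
    (d.erase k).get? k' = d.get? k' := by
  unfold PySem.Dict.erase PySem.Dict.get?
  simp only
  congr 1
  induction d.items with
  | nil => rfl
  | cons p l ih =>
    cases hbk : (p.1 == k) with
    | true =>
      have hk : p.1 = k := by simpa using hbk
      have hk' : (p.1 == k') = false := by simp [hk, h]
      simp only [List.filter_cons, hbk, Bool.not_true, List.find?_cons, hk']
      simpa [hk'] using ih
    | false =>
      simp only [List.filter_cons, hbk, Bool.not_false, if_pos, List.find?_cons]
      cases hbk' : (p.1 == k') <;> simp [ih]

-- invariants of last_map: nodup keys, each key the lowercase of its value's original key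
lemma lastMap_aux (items : List (String × String)) (d : PySem.Dict String (String × String))
    (h1 : d.keys.Nodup) (h2 : ∀ kv ∈ d.items, kv.1 = PySem.Str.lower kv.2.1) :
    (items.foldl (fun d kv => d.insert (PySem.Str.lower kv.1) (kv.1, kv.2)) d).keys.Nodup ∧
    ∀ kv ∈ (items.foldl (fun d kv => d.insert (PySem.Str.lower kv.1) (kv.1, kv.2)) d).items,
      kv.1 = PySem.Str.lower kv.2.1 := by
  induction items generalizing d with
  | nil => exact ⟨h1, h2⟩
  | cons p l ih =>
    refine ih _ (PySem.Dict.nodup_keys_insert _ _ _ h1) ?_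
    intro kv hkv
    rcases (PySem.Dict.mem_items_insert _ _ _ _).1 hkv with rfl | ⟨hm, -⟩
    · rfl
    · exact h2 _ hm

lemma lastMap_nodup (items : List (String × String)) : (lastMapOf items).keys.Nodup :=
  (lastMap_aux items PySem.Dict.empty PySem.Dict.nodup_keys_empty (by simp [PySem.Dict.empty])).1

lemma lastMap_inv (items : List (String × String)) :
    ∀ kv ∈ (lastMapOf items).items, kv.1 = PySem.Str.lower kv.2.1 :=
  (lastMap_aux items PySem.Dict.empty PySem.Dict.nodup_keys_empty (by simp [PySem.Dict.empty])).2

-- A's first loop, characterized: selected pairs in META_ORDER order; the rest stays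
lemma loopA (ws : List String) (d : PySem.Dict String (String × String))
    (acc : List (String × String)) (hnd : (ws.map PySem.Str.lower).Nodup) :
    ws.foldl popStep (d, acc)
    = (PySem.Dict.mk (d.items.filter (fun kv => !((ws.map PySem.Str.lower).contains kv.1))),
       acc ++ ws.filterMap (fun w => (d.get? (PySem.Str.lower w)).map (fun p => (w, p.2)))) := by
  induction ws generalizing d acc with
  | nil => simp
  | cons w ws ih =>
    simp only [List.map_cons, List.nodup_cons] at hnd
    obtain ⟨hw, hnd⟩ := hnd
    simp only [List.foldl_cons]
    cases hg : d.get? (PySem.Str.lower w) with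
    | none =>
      have hstep : popStep (d, acc) w = (d, acc) := by
        simp [popStep, PySem.Dict.pop?, hg]
      rw [hstep, ih _ _ hnd]
      have hk : ∀ kv ∈ d.items, kv.1 ≠ PySem.Str.lower w := by
        intro kv hm
        have := (PySem.Dict.get?_eq_none_iff_not_mem_keys d _).1 hg
        intro he
        have hkm : kv.1 ∈ d.items.map Prod.fst := List.mem_map_of_mem (f := Prod.fst) hm
        exact this (he ▸ hkm)
      simp only [Prod.mk.injEq]
      constructor
      · congr 1
        refine List.filter_congr ?_
        intro kv hm
        simp [hk kv hm]
      · simp [hg]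
    | some p =>
      have hstep : popStep (d, acc) w = (d.erase (PySem.Str.lower w), acc ++ [(w, p.2)]) := by
        simp [popStep, PySem.Dict.pop?, hg]
      rw [hstep, ih _ _ hnd]
      simp only [Prod.mk.injEq]
      constructor
      · congr 1
        show ((d.erase (PySem.Str.lower w)).items).filter _ = _
        have : (d.erase (PySem.Str.lower w)).items
            = d.items.filter (fun kv => !(kv.1 == PySem.Str.lower w)) := rfl
        rw [this, List.filter_filter]
        refine List.filter_congr ?_
        intro kv _
        simp only [List.map_cons, List.contains_cons, Bool.not_or]
        exact Bool.and_comm _ _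
      · have hrw : ws.filterMap
            (fun w' => ((d.erase (PySem.Str.lower w)).get? (PySem.Str.lower w')).map (fun p => (w', p.2)))
            = ws.filterMap (fun w' => (d.get? (PySem.Str.lower w')).map (fun p => (w', p.2))) := by
          refine List.filterMap_congr ?_
          intro w' hm
          rw [get?_erase_of_ne]
          intro he
          exact hw (he ▸ List.mem_map_of_mem hm)
        rw [hrw]
        simp [hg]

-- slot contents used to state B's loop invariant
def slotQ (L : List (String × (String × String))) (lw w : String) (s : Option (String × String)) :
    Option (String × String) :=
  match (PySem.Dict.mk L).get? lw with
  | some p => some (w, p.2)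
  | none => s

lemma slotQ_cons_ne (lk : String) (kv2 : String × String) (rest : List (String × (String × String)))
    (lw w : String) (s : Option (String × String)) (h : (lk == lw) = false) :
    slotQ ((lk, kv2) :: rest) lw w s = slotQ rest lw w s := by
  simp [slotQ, PySem.Dict.get?_mk_cons, h]

lemma slotQ_self (lk : String) (kv2 : String × String) (rest : List (String × (String × String)))
    (w : String) (s : Option (String × String)) :
    slotQ ((lk, kv2) :: rest) lk w s = some (w, kv2.2) := by
  simp [slotQ, PySem.Dict.get?_mk_cons]

lemma slotQ_of_not_mem (rest : List (String × (String × String))) (lw w : String)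
    (s : Option (String × String)) (h : lw ∉ rest.map Prod.fst) :
    slotQ rest lw w s = s := by
  have : (PySem.Dict.mk rest).get? lw = none := by
    rw [PySem.Dict.get?_eq_none_iff_not_mem_keys]
    simpa [PySem.Dict.keys] using h
  simp [slotQ, this]

-- B's loop, characterized: each slot holds its META_ORDER key's entry, unknown keys collect in order
lemma loopB (L : List (String × (String × String))) (hnd : (L.map (·.1)).Nodup)
    (s0 s1 s2 s3 s4 s5 : Option (String × String)) (acc : List (String × String)) :
    L.foldl bucketStep ([s0, s1, s2, s3, s4, s5], acc)
    = ([slotQ L "title" "Title" s0, slotQ L "author" "Author" s1, slotQ L "date" "Date" s2,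
        slotQ L "background" "Background" s3, slotQ L "buttonimage" "ButtonImage" s4,
        slotQ L "buttondesc" "ButtonDesc" s5],
       acc ++ (L.filter (fun kv => (metaIndex.get? kv.1).isNone)).map (fun kv => (kv.2.1, kv.2.2))) := by
  induction L generalizing s0 s1 s2 s3 s4 s5 acc with
  | nil => simp [slotQ, PySem.Dict.get?]
  | cons kv rest ih =>
    obtain ⟨lk, kv2⟩ := kv
    simp only [List.map_cons, List.nodup_cons] at hnd
    obtain ⟨hw, hnd⟩ := hnd
    simp only [List.foldl_cons]
    cases hg : metaIndex.get? lk with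
    | none =>
      have hstep : bucketStep ([s0, s1, s2, s3, s4, s5], acc) (lk, kv2)
          = ([s0, s1, s2, s3, s4, s5], acc ++ [(kv2.1, kv2.2)]) := by
        simp [bucketStep, hg]
      have hmem : lk ∉ (metaIndex.keys) := (PySem.Dict.get?_eq_none_iff_not_mem_keys _ _).1 hg
      rw [metaIndex_eq] at hmem
      simp only [PySem.Dict.keys, List.map_cons, List.map_nil, List.mem_cons,
        not_or] at hmem
      obtain ⟨n1, n2, n3, n4, n5, n6, -⟩ := hmem
      rw [hstep, ih hnd]
      rw [slotQ_cons_ne _ _ _ _ _ _ (by simp [n1]), slotQ_cons_ne _ _ _ _ _ _ (by simp [n2]),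
          slotQ_cons_ne _ _ _ _ _ _ (by simp [n3]), slotQ_cons_ne _ _ _ _ _ _ (by simp [n4]),
          slotQ_cons_ne _ _ _ _ _ _ (by simp [n5]), slotQ_cons_ne _ _ _ _ _ _ (by simp [n6])]
      simp [hg]
    | some hit =>
      have hmem := PySem.Dict.mem_items_of_get?_eq_some _ hg
      rw [metaIndex_eq] at hmem
      simp only [List.mem_cons, List.not_mem_nil, or_false,
        Prod.mk.injEq] at hmem
      rcases hmem with ⟨rfl, rfl⟩ | ⟨rfl, rfl⟩ | ⟨rfl, rfl⟩ | ⟨rfl, rfl⟩ | ⟨rfl, rfl⟩ | ⟨rfl, rfl⟩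
      case _ =>  -- title
        have hstep : bucketStep ([s0, s1, s2, s3, s4, s5], acc) ("title", kv2)
            = ([some ("Title", kv2.2), s1, s2, s3, s4, s5], acc) := by
          simp [bucketStep, hg]
        rw [hstep, ih hnd]
        rw [slotQ_self, slotQ_cons_ne _ _ _ _ _ _ (by decide), slotQ_cons_ne _ _ _ _ _ _ (by decide),
            slotQ_cons_ne _ _ _ _ _ _ (by decide), slotQ_cons_ne _ _ _ _ _ _ (by decide),
            slotQ_cons_ne _ _ _ _ _ _ (by decide)]
        rw [slotQ_of_not_mem _ "title" "Title" _ (by simpa using hw)]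
        simp [hg]
      case _ =>  -- author
        have hstep : bucketStep ([s0, s1, s2, s3, s4, s5], acc) ("author", kv2)
            = ([s0, some ("Author", kv2.2), s2, s3, s4, s5], acc) := by
          simp [bucketStep, hg]
        rw [hstep, ih hnd]
        rw [slotQ_cons_ne _ _ _ _ _ _ (by decide), slotQ_self, slotQ_cons_ne _ _ _ _ _ _ (by decide),
            slotQ_cons_ne _ _ _ _ _ _ (by decide), slotQ_cons_ne _ _ _ _ _ _ (by decide),
            slotQ_cons_ne _ _ _ _ _ _ (by decide)]
        rw [slotQ_of_not_mem _ "author" "Author" _ (by simpa using hw)]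
        simp [hg]
      case _ =>  -- date
        have hstep : bucketStep ([s0, s1, s2, s3, s4, s5], acc) ("date", kv2)
            = ([s0, s1, some ("Date", kv2.2), s3, s4, s5], acc) := by
          simp [bucketStep, hg]
        rw [hstep, ih hnd]
        rw [slotQ_cons_ne _ _ _ _ _ _ (by decide), slotQ_cons_ne _ _ _ _ _ _ (by decide), slotQ_self,
            slotQ_cons_ne _ _ _ _ _ _ (by decide), slotQ_cons_ne _ _ _ _ _ _ (by decide),
            slotQ_cons_ne _ _ _ _ _ _ (by decide)]
        rw [slotQ_of_not_mem _ "date" "Date" _ (by simpa using hw)]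
        simp [hg]
      case _ =>  -- background
        have hstep : bucketStep ([s0, s1, s2, s3, s4, s5], acc) ("background", kv2)
            = ([s0, s1, s2, some ("Background", kv2.2), s4, s5], acc) := by
          simp [bucketStep, hg]
        rw [hstep, ih hnd]
        rw [slotQ_cons_ne _ _ _ _ _ _ (by decide), slotQ_cons_ne _ _ _ _ _ _ (by decide),
            slotQ_cons_ne _ _ _ _ _ _ (by decide), slotQ_self, slotQ_cons_ne _ _ _ _ _ _ (by decide),
            slotQ_cons_ne _ _ _ _ _ _ (by decide)]
        rw [slotQ_of_not_mem _ "background" "Background" _ (by simpa using hw)]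
        simp [hg]
      case _ =>  -- buttonimage
        have hstep : bucketStep ([s0, s1, s2, s3, s4, s5], acc) ("buttonimage", kv2)
            = ([s0, s1, s2, s3, some ("ButtonImage", kv2.2), s5], acc) := by
          simp [bucketStep, hg]
        rw [hstep, ih hnd]
        rw [slotQ_cons_ne _ _ _ _ _ _ (by decide), slotQ_cons_ne _ _ _ _ _ _ (by decide),
            slotQ_cons_ne _ _ _ _ _ _ (by decide), slotQ_cons_ne _ _ _ _ _ _ (by decide), slotQ_self,
            slotQ_cons_ne _ _ _ _ _ _ (by decide)]
        rw [slotQ_of_not_mem _ "buttonimage" "ButtonImage" _ (by simpa using hw)]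
        simp [hg]
      case _ =>  -- buttondesc
        have hstep : bucketStep ([s0, s1, s2, s3, s4, s5], acc) ("buttondesc", kv2)
            = ([s0, s1, s2, s3, s4, some ("ButtonDesc", kv2.2)], acc) := by
          simp [bucketStep, hg]
        rw [hstep, ih hnd]
        rw [slotQ_cons_ne _ _ _ _ _ _ (by decide), slotQ_cons_ne _ _ _ _ _ _ (by decide),
            slotQ_cons_ne _ _ _ _ _ _ (by decide), slotQ_cons_ne _ _ _ _ _ _ (by decide),
            slotQ_cons_ne _ _ _ _ _ _ (by decide), slotQ_self]
        rw [slotQ_of_not_mem _ "buttondesc" "ButtonDesc" _ (by simpa using hw)]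
        simp [hg]

-- the two "known keys" segments coincide
lemma heads_eq (d : PySem.Dict String (String × String)) :
    ([slotQ d.items "title" "Title" none, slotQ d.items "author" "Author" none,
      slotQ d.items "date" "Date" none, slotQ d.items "background" "Background" none,
      slotQ d.items "buttonimage" "ButtonImage" none,
      slotQ d.items "buttondesc" "ButtonDesc" none].filterMap id)
    = metaOrder.filterMap (fun w => (d.get? (PySem.Str.lower w)).map (fun p => (w, p.2))) := by
  have hq : ∀ lw w, slotQ d.items lw w none = (d.get? lw).map (fun p => (w, p.2)) := by
    intro lw w
    have he : PySem.Dict.mk d.items = d := rfl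
    unfold slotQ
    rw [he]
    cases d.get? lw <;> simp
  simp only [hq]
  have h1 : PySem.Str.lower "Title" = "title" := by decide
  have h2 : PySem.Str.lower "Author" = "author" := by decide
  have h3 : PySem.Str.lower "Date" = "date" := by decide
  have h4 : PySem.Str.lower "Background" = "background" := by decide
  have h5 : PySem.Str.lower "ButtonImage" = "buttonimage" := by decide
  have h6 : PySem.Str.lower "ButtonDesc" = "buttondesc" := by decide
  simp only [metaOrder, List.filterMap_cons, List.filterMap_nil, h1, h2, h3, h4, h5, h6]
  cases d.get? "title" <;> cases d.get? "author" <;> cases d.get? "date" <;>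
    cases d.get? "background" <;> cases d.get? "buttonimage" <;> cases d.get? "buttondesc" <;>
    simp

-- the two "unknown keys" filters coincide
lemma pred_eq (k : String) : (metaIndex.get? k).isNone = !(lows.contains k) := by
  rw [metaIndex_eq]
  simp only [PySem.Dict.get?_mk_cons, lows, List.contains_cons, List.contains_nil]
  by_cases e1 : ("title" : String) = k <;>
  by_cases e2 : ("author" : String) = k <;>
  by_cases e3 : ("date" : String) = k <;>
  by_cases e4 : ("background" : String) = k <;>
  by_cases e5 : ("buttonimage" : String) = k <;>
  by_cases e6 : ("buttondesc" : String) = k <;>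
    simp [e1, e2, e3, e4, e5, e6, PySem.Dict.get?]
  exact ⟨fun h => e1 h.symm, fun h => e2 h.symm, fun h => e3 h.symm,
    fun h => e4 h.symm, fun h => e5 h.symm, fun h => e6 h.symm⟩

theorem rebuild_meta_spec : Claim_equal_rebuild_meta := by
  intro items _
  show rebuild_meta items = rebuild_meta_alt items
  have hnodup : (lastMapOf items).keys.Nodup := lastMap_nodup items
  have hinv := lastMap_inv items
  rw [rebuild_meta, rebuild_meta_alt]
  have hA := loopA metaOrder (lastMapOf items) [] (by decide)
  have hrep : (List.replicate metaOrder.length none : List (Option (String × String)))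
      = [none, none, none, none, none, none] := rfl
  have hB := loopB (lastMapOf items).items
      (by simpa [PySem.Dict.keys] using hnodup) none none none none none none []
  rw [hA, hrep, hB]
  dsimp only
  simp only [List.nil_append]
  rw [lows_eq]
  -- rest of last_map (A) and the unknown-key list (B)
  have hpred : ((lastMapOf items).items.filter (fun kv => (metaIndex.get? kv.1).isNone))
      = (lastMapOf items).items.filter (fun kv => !(lows.contains kv.1)) := by
    refine List.filter_congr ?_
    intro kv _
    exact pred_eq kv.1
  rw [hpred]
  set L := (lastMapOf items).items with hL
  set rest := L.filter (fun kv => !(lows.contains kv.1)) with hrest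
  -- B sorts the values of 'rest' by lowercased key = A sorts 'rest' by stored key, then drops keys
  have hkeysnd : (rest.map Prod.fst).Nodup := by
    have hsub : List.Sublist (rest.map Prod.fst) (L.map Prod.fst) :=
      List.Sublist.map Prod.fst (List.filter_sublist)
    exact hsub.nodup (by simpa [PySem.Dict.keys] using hnodup)
  have hsorted : PySem.List.sorted (rest.map (fun kv => (kv.2.1, kv.2.2)))
        (fun kv => PySem.Str.lower kv.1)
      = (PySem.List.sorted rest (fun kv => kv.1)).map (fun kv => (kv.2.1, kv.2.2)) := by
    refine PySem.List.sorted_eq_of_perm_of_pairwise_lt _ _ _ ?_ ?_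
    · exact (PySem.List.sorted_perm rest (fun kv => kv.1) false).map _
    · have hle : (PySem.List.sorted rest (fun kv => kv.1)).Pairwise
          (fun a b => a.1 ≤ b.1) := PySem.List.sorted_pairwise rest (fun kv => kv.1)
      have hnd2 : ((PySem.List.sorted rest (fun kv => kv.1)).map Prod.fst).Nodup := by
        refine ((PySem.List.sorted_perm rest (fun kv => kv.1) false).map Prod.fst).nodup_iff.2 hkeysnd
      have hne : (PySem.List.sorted rest (fun kv => kv.1)).Pairwise
          (fun a b => a.1 ≠ b.1) := (List.pairwise_map).1 hnd2
      have hlt : (PySem.List.sorted rest (fun kv => kv.1)).Pairwise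
          (fun a b => a.1 < b.1) := (hle.and hne).imp (fun h => lt_of_le_of_ne h.1 h.2)
      have hmemlow : ∀ kv ∈ PySem.List.sorted rest (fun kv => kv.1),
          kv.1 = PySem.Str.lower kv.2.1 := by
        intro kv hm
        have : kv ∈ rest := (PySem.List.mem_sorted _ _ _ _).1 hm
        exact hinv kv (List.mem_of_mem_filter this)
      refine (List.pairwise_map).2 ?_
      refine hlt.imp_of_mem ?_
      intro a b ha hb h
      simpa [← hmemlow a ha, ← hmemlow b hb] using h
  rw [hsorted]
  have hmapmap : ((PySem.List.sorted rest (fun kv => kv.1)).map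
        (fun kv => (kv.2.1, kv.2.2))).map (fun kv => (normCap kv.1, kv.2))
      = (PySem.List.sorted rest (fun kv => kv.1)).map (fun kv => (normCap kv.2.1, kv.2.2)) := by
    rw [List.map_map]; rfl
  rw [hmapmap, heads_eq]
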